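-- pv_equiv track=rewrite | github.com/c1ongyan/COURSES | 密码学/作业/仿射解密脚本/仿射解密.py | getFrequencyOrder
-- ===== SOURCE A (Python) =====
-- ETAOIN='ETAOINSHRDLCUMWFGYPBVKJXQZ'  #英文中词频排列顺序（降序）
--
-- Symbols='ABCDEFGHIJKLMNOPQRSTUVWXYZ'  #明文空间 密文空间
--
-- def getLetterCount(message):
--
-- #统计字符串中每个字母的数量
-- 	LetterCount={'A':0,'B':0,'C':0,'D':0,'E':0,'F':0,'G':0,'H':0,'I':0,'J':0,'K':0,'L':0,'M':0,'N':0,'O':0,'P':0,'Q':0,'R':0,'S':0,'T':0,'U':0,'V':0,'W':0,'X':0,'Y':0,'Z':0}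
--
-- 	for i in message.upper():
-- 		if i in Symbols:
-- 			LetterCount[i]+=1
--
-- 	return LetterCount
--
-- def getItemAtIndexZero(x):
-- #返回变量的下标为0的值
-- 	return x[0]
--
-- def getFrequencyOrder(message):
-- #按照字母出现的次数排序
-- 	letterToFreq=getLetterCount(message) #字母到次数的映射
-- 	freqToLetter={} #次数到字母的映射
--
-- 	for i in Symbols:
-- 		if letterToFreq[i] not in freqToLetter:   #判断字母对应次数是否是字典freqToLetter的键，若不是则以该次数为键，以对于的字母为值；若是，则在最后追加一组键值对
-- 			freqToLetter[letterToFreq[i]]=[i]     #因为次数可能出现相同的情况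
-- 		else:
-- 			freqToLetter[letterToFreq[i]].append(i)
--
-- 	for freq in freqToLetter:
-- 		freqToLetter[freq].sort(key=ETAOIN.find,reverse=True)  #将同一次数的键所对应的字母按照ETAOIN的降序排列(做一个约定)
-- 		freqToLetter[freq]=''.join(freqToLetter[freq])
--
-- 	freqPairs=list(freqToLetter.items())                 #将字典变成一个元组列表
-- 	freqPairs.sort(key=getItemAtIndexZero,reverse=True)  #按照元组列表索引为0的值排序
--
-- 	return freqPairs
-- ===== SOURCE B (Python) =====
-- ETAOIN='ETAOINSHRDLCUMWFGYPBVKJXQZ'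
--
-- Symbols='ABCDEFGHIJKLMNOPQRSTUVWXYZ'
--
-- def getFrequencyOrder(message):
--     # Count every letter (all 26 letters present, zero-counted ones included).
--     counts = dict.fromkeys(Symbols, 0)
--     for ch in message.upper():
--         if ch in Symbols:
--             counts[ch] += 1
--     # One tuple per distinct count, counts descending; within a count the
--     # letters come from a single filtering pass over reversed ETAOIN, which
--     # yields them in descending ETAOIN rank directly (no per-group sort).
--     result = []
--     for freq in sorted(set(counts.values()), reverse=True):
--         result.append((freq, ''.join(c for c in reversed(ETAOIN) if counts[c] == freq)))
--     return result
-- ===== Notes on version B (the rewrite author's own statement) =====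
-- stated objective: simpler
-- what changed: A groups letters into a freq->letters dict, sorts each group by ETAOIN rank, joins, then sorts the item pairs; B instead sorts the distinct counts descending once and emits each group by a single filtering pass over reversed ETAOIN (which yields the letters already in descending ETAOIN rank), with no grouping dict and no per-group sort.
import Mathlib
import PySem

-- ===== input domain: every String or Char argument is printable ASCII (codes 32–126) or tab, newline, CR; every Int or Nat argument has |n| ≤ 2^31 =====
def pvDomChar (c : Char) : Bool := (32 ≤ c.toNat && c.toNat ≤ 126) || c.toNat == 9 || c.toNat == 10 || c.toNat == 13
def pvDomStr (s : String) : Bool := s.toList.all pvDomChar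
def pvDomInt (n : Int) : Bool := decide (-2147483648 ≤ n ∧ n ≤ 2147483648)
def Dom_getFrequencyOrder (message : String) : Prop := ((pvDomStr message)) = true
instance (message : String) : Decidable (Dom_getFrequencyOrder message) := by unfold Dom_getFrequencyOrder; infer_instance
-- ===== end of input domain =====

-- B replaces A's group-into-a-dict-then-sort-twice pipeline by a single sorted pass over the
-- distinct counts plus a filtering pass over reversed ETAOIN per count (simpler, no per-group sort).

def pvETAOIN : String := "ETAOINSHRDLCUMWFGYPBVKJXQZ"
def pvSymbols : String := "ABCDEFGHIJKLMNOPQRSTUVWXYZ"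

-- ===== PORT A =====
-- the literal 26-entry dict, then the counting loop; LetterCount[i] += 1 only runs when
-- i in Symbols, so the key is always present and Dict.modify with default 0 is exact.
def getLetterCount (message : String) : PySem.Dict Char Int :=
  let letterCount : PySem.Dict Char Int := PySem.Dict.ofList
    [('A',0),('B',0),('C',0),('D',0),('E',0),('F',0),('G',0),('H',0),('I',0),('J',0),('K',0),('L',0),('M',0),
     ('N',0),('O',0),('P',0),('Q',0),('R',0),('S',0),('T',0),('U',0),('V',0),('W',0),('X',0),('Y',0),('Z',0)]
  (PySem.Str.upper message).toList.foldl
    (fun d i => if PySem.Str.isIn (String.ofList [i]) pvSymbols then d.modify i 0 (fun v => v + 1) else d)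
    letterCount

def getItemAtIndexZero (x : Int × String) : Int := x.1

def getFrequencyOrder (message : String) : List (Int × String) :=
  let letterToFreq := getLetterCount message
  -- letterToFreq[i] : i is always a key, so getD i 0 is exact; the if-absent-insert-[i]/else-append
  -- branch pair is exactly Dict.modify with default [] (insert keeps an existing key's position).
  let freqToLetter : PySem.Dict Int (List Char) :=
    pvSymbols.toList.foldl
      (fun d i => d.modify (letterToFreq.getD i 0) [] (fun v => v ++ [i]))
      PySem.Dict.empty
  -- the second loop rewrites each value in place (list of letters -> joined string); the value
  -- type changes, so it is ported as rebuilding the dict over its items in the same key order — exact.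
  let freqToLetter2 : PySem.Dict Int String :=
    freqToLetter.items.foldl
      (fun d p => d.insert p.1
        (String.ofList (PySem.List.sorted p.2 (fun c => PySem.Str.find pvETAOIN (String.ofList [c])) true)))
      PySem.Dict.empty
  let freqPairs := freqToLetter2.items
  PySem.List.sorted freqPairs (fun p => getItemAtIndexZero p) true

-- ===== PORT B =====
def getFrequencyOrder_alt (message : String) : List (Int × String) :=
  -- counts = dict.fromkeys(Symbols, 0), then the same counting loop as A's helper
  let counts0 : PySem.Dict Char Int :=
    PySem.Dict.ofList (pvSymbols.toList.map (fun c => (c, (0 : Int))))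
  let counts :=
    (PySem.Str.upper message).toList.foldl
      (fun d ch => if PySem.Str.isIn (String.ofList [ch]) pvSymbols then d.modify ch 0 (fun v => v + 1) else d)
      counts0
  -- for freq in sorted(set(counts.values()), reverse=True): append (freq, join of the filter pass)
  (PySem.List.sorted (PySem.Set.ofList counts.values) (fun x => x) true).foldl
    (fun result freq =>
      result ++ [(freq, String.ofList (pvETAOIN.toList.reverse.filter (fun c => counts.getD c 0 == freq)))])
    []

-- ===== PRECONDITION & SPEC =====
def Spec_getFrequencyOrder (message : String) (out : List (Int × String)) : Prop := out = getFrequencyOrder_alt message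
instance (message : String) (out : List (Int × String)) : Decidable (Spec_getFrequencyOrder message out) := by unfold Spec_getFrequencyOrder; infer_instance

-- ===== CLAIM (what is proved, stated in full; the proofs are below) =====
def Claim_equal_getFrequencyOrder : Prop := ∀ (message : String), Dom_getFrequencyOrder message → Spec_getFrequencyOrder message (getFrequencyOrder message)

-- ===== LEMMAS AND PROOFS =====

-- a one-char string is a substring of Symbols iff the char is one of its letters
lemma pv_isIn_singleton (c : Char) (s : String) :
    PySem.Str.isIn (String.ofList [c]) s = true ↔ c ∈ s.toList := by
  rw [PySem.Str.isIn_iff_infix, String.toList_ofList]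
  constructor
  · intro h
    exact List.singleton_sublist.mp h.sublist
  · intro h
    obtain ⟨l, r, hlr⟩ := List.mem_iff_append.mp h
    exact ⟨l, r, by rw [hlr]; simp⟩

-- one counting step never adds a key (the guard puts i among the 26 letters)
lemma pv_keys_step (ms : List Char) (d : PySem.Dict Char Int) (hd : d.keys = pvSymbols.toList) :
    (ms.foldl (fun d i => if PySem.Str.isIn (String.ofList [i]) pvSymbols then d.modify i 0 (fun v => v + 1) else d) d).keys
      = pvSymbols.toList := by
  induction ms generalizing d with
  | nil => simpa using hd
  | cons c ms ih =>
    simp only [List.foldl_cons]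
    apply ih
    split_ifs with h
    · have h' : d.contains c = true := by
        rw [PySem.Dict.contains_iff_mem_keys, hd]
        exact (pv_isIn_singleton c pvSymbols).mp h
      rw [PySem.Dict.keys_modify, PySem.Dict.keys_insert_of_contains _ _ h', hd]
    · exact hd

-- the keys of getLetterCount are exactly the 26 letters
lemma pv_keys_count (message : String) : (getLetterCount message).keys = pvSymbols.toList := by
  exact pv_keys_step (PySem.Str.upper message).toList _ (by decide)

-- the two programs agree from any counts dict whose keys are the 26 letters
lemma pv_post_eq (cnt : PySem.Dict Char Int) (hk : cnt.keys = pvSymbols.toList) :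
    PySem.List.sorted
      (((pvSymbols.toList.foldl
            (fun d i => d.modify (cnt.getD i 0) [] (fun v => v ++ [i]))
            PySem.Dict.empty).items.foldl
          (fun d p => d.insert p.1
            (String.ofList (PySem.List.sorted p.2 (fun c => PySem.Str.find pvETAOIN (String.ofList [c])) true)))
          PySem.Dict.empty).items)
      (fun p => getItemAtIndexZero p) true
    = (PySem.List.sorted (PySem.Set.ofList cnt.values) (fun x => x) true).foldl
        (fun result freq =>
          result ++ [(freq, String.ofList (pvETAOIN.toList.reverse.filter (fun c => cnt.getD c 0 == freq)))])
        [] := by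
  have hndk : cnt.keys.Nodup := by rw [hk]; decide
  have hvals : cnt.values = pvSymbols.toList.map (fun i => cnt.getD i 0) := by
    rw [PySem.Dict.values_eq_map_keys cnt hndk 0, hk]
  set D1 := pvSymbols.toList.foldl (fun d i => d.modify (cnt.getD i 0) [] (fun v => v ++ [i])) PySem.Dict.empty
    with hD1
  -- the grouping dict D1: keys, nodup, lookups, items
  have hkeys1 : D1.keys = PySem.Set.ofList (pvSymbols.toList.map (fun i => cnt.getD i 0)) := by
    rw [hD1, PySem.Dict.keys_foldl_modify_key _ (fun i => cnt.getD i 0) [] (fun _ x => (fun v => v ++ [x]))]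
    rfl
  have hnd1 : D1.keys.Nodup := by
    rw [hkeys1]; exact PySem.Set.nodup_ofList _
  have hpair : D1 = (pvSymbols.toList.map (fun i => ((cnt.getD i 0 : Int), i))).foldl
      (fun d p => PySem.Dict.modify d p.1 [] (fun v => v ++ [p.2])) PySem.Dict.empty := by
    rw [hD1, List.foldl_map]
  have hgetD1 : ∀ k : Int, D1.getD k [] = pvSymbols.toList.filter (fun i => cnt.getD i 0 == k) := by
    intro k
    rw [hpair, PySem.Dict.getD_foldl_modify_append, List.filter_map]
    simp [Function.comp_def]
  have hitems1 : D1.items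
      = (PySem.Set.ofList (pvSymbols.toList.map (fun i => cnt.getD i 0))).map
          (fun k => (k, pvSymbols.toList.filter (fun i => cnt.getD i 0 == k))) := by
    rw [PySem.Dict.items_eq_map_keys _ hnd1 [], hkeys1]
    exact List.map_congr_left (fun k _ => by rw [hgetD1 k])
  have hnd1' : (D1.items.map (fun p => p.1)).Nodup := by
    have h := hnd1; simp only [PySem.Dict.keys] at h; exact h
  -- each group, sorted by descending ETAOIN rank, is the filter pass over reversed ETAOIN
  have hgrp : ∀ k : Int,
      PySem.List.sorted (pvSymbols.toList.filter (fun i => cnt.getD i 0 == k))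
          (fun c => PySem.Str.find pvETAOIN (String.ofList [c])) true
        = pvETAOIN.toList.reverse.filter (fun c => cnt.getD c 0 == k) := by
    intro k
    apply PySem.List.sorted_rev_eq_of_perm_of_pairwise_gt
    · exact List.Perm.filter _ (by decide : pvETAOIN.toList.reverse.Perm pvSymbols.toList)
    · exact List.Pairwise.sublist List.filter_sublist
        (by decide : pvETAOIN.toList.reverse.Pairwise
          (fun a b => PySem.Str.find pvETAOIN (String.ofList [b]) < PySem.Str.find pvETAOIN (String.ofList [a])))
  -- the rebuilt string dict: its items are the canonical per-count list
  have hitems2 :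
      (D1.items.foldl
          (fun d p => d.insert p.1
            (String.ofList (PySem.List.sorted p.2 (fun c => PySem.Str.find pvETAOIN (String.ofList [c])) true)))
          PySem.Dict.empty).items
        = (PySem.Set.ofList (pvSymbols.toList.map (fun i => cnt.getD i 0))).map
            (fun freq => (freq, String.ofList (pvETAOIN.toList.reverse.filter (fun c => cnt.getD c 0 == freq)))) := by
    rw [PySem.Dict.items_foldl_insert_fresh D1.items (fun p => p.1)
          (fun p => String.ofList (PySem.List.sorted p.2 (fun c => PySem.Str.find pvETAOIN (String.ofList [c])) true))
          PySem.Dict.empty (fun a _ => PySem.Dict.contains_empty _) hnd1']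
    rw [hitems1, List.map_map]
    refine (List.nil_append _).trans (List.map_congr_left (fun k _ => ?_))
    simp only [Function.comp_def]
    rw [hgrp k]
  -- assemble: both sides are the same map over the distinct counts, descending
  rw [PySem.List.foldl_append_singleton_eq_map, List.nil_append, hvals, hitems2]
  apply PySem.List.sorted_rev_eq_of_perm_of_pairwise_gt
  · exact (PySem.List.sorted_perm (PySem.Set.ofList (pvSymbols.toList.map (fun i => cnt.getD i 0))) (fun x => x) true).map _
  · rw [List.pairwise_map]
    have h1 := PySem.List.sorted_pairwise_rev (PySem.Set.ofList (pvSymbols.toList.map (fun i => cnt.getD i 0))) (fun x => x)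
    have h2 : (PySem.List.sorted (PySem.Set.ofList (pvSymbols.toList.map (fun i => cnt.getD i 0))) (fun x => x) true).Nodup :=
      ((PySem.List.sorted_perm _ _ true).nodup_iff).mpr (PySem.Set.nodup_ofList _)
    exact (h1.and h2).imp (fun h => lt_of_le_of_ne h.1 h.2.symm)

-- ===== VERDICT (by name: the statement is the Claim_ definition above) =====
theorem getFrequencyOrder_spec : Claim_equal_getFrequencyOrder := by
  intro message _
  unfold Spec_getFrequencyOrder getFrequencyOrder getFrequencyOrder_alt
  have hseed : (PySem.Dict.ofList (pvSymbols.toList.map (fun c => (c, (0 : Int)))))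
      = PySem.Dict.ofList
        [('A',(0:Int)),('B',0),('C',0),('D',0),('E',0),('F',0),('G',0),('H',0),('I',0),('J',0),('K',0),('L',0),('M',0),
         ('N',0),('O',0),('P',0),('Q',0),('R',0),('S',0),('T',0),('U',0),('V',0),('W',0),('X',0),('Y',0),('Z',0)] := by
    decide
  show _ = _
  rw [hseed]
  exact pv_post_eq (getLetterCount message) (pv_keys_count message)
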